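-- pv_equiv track=rewrite | github.com/Saintis/Overheal | count_buffs.py | aggregate_buff_lines
-- ===== SOURCE A (Python) =====
-- def aggregate_buff_lines(res_lines, buff_cast_lines, buff_applied_lines):
--     """
--     Aggregate buff lines into list of # casts for each spell
--     """
--
--     res_data = {}
--     buff_cast_data = {}
--     buff_applied_data = {}
--
--     for lines, data in zip((res_lines, buff_cast_lines, buff_applied_lines), (res_data, buff_cast_data, buff_applied_data)):
--         for spell_id, spell_name, source, target in lines:
--             if spell_id not in data:
--                 data[spell_id] = {}
--
--             spell_dict = data[spell_id]
--
--             if source not in spell_dict: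
--                 spell_dict[source] = 0
--
--             spell_dict[source] += 1
--
--     return res_data, buff_cast_data, buff_applied_data
-- ===== SOURCE B (Python) =====
-- def aggregate_buff_lines(res_lines, buff_cast_lines, buff_applied_lines):
--     """
--     Aggregate buff lines into list of # casts for each spell
--     """
--
--     def tally(lines):
--         # project each row to its (spell_id, source) pair
--         pairs = [(spell_id, source) for spell_id, _name, source, _target in lines]
--         # group-by: for each distinct spell_id (first-occurrence order),
--         # gather its sources and count each distinct source with list.count
--         data = {}
--         for spell_id in dict.fromkeys(sid for sid, _ in pairs):
--             sources = [src for sid, src in pairs if sid == spell_id]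
--             data[spell_id] = {src: sources.count(src) for src in dict.fromkeys(sources)}
--         return data
--
--     return tally(res_lines), tally(buff_cast_lines), tally(buff_applied_lines)
-- ===== Notes on version B (the rewrite author's own statement) =====
-- stated objective: alternative
-- what changed: Replaces A's single incremental pass that mutates nested per-spell counter dicts in place with a group-by: project rows to (spell_id, source) pairs, dedup the spell_ids, and for each distinct spell_id filter out its sources and count each distinct source with list.count.
import Mathlib
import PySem

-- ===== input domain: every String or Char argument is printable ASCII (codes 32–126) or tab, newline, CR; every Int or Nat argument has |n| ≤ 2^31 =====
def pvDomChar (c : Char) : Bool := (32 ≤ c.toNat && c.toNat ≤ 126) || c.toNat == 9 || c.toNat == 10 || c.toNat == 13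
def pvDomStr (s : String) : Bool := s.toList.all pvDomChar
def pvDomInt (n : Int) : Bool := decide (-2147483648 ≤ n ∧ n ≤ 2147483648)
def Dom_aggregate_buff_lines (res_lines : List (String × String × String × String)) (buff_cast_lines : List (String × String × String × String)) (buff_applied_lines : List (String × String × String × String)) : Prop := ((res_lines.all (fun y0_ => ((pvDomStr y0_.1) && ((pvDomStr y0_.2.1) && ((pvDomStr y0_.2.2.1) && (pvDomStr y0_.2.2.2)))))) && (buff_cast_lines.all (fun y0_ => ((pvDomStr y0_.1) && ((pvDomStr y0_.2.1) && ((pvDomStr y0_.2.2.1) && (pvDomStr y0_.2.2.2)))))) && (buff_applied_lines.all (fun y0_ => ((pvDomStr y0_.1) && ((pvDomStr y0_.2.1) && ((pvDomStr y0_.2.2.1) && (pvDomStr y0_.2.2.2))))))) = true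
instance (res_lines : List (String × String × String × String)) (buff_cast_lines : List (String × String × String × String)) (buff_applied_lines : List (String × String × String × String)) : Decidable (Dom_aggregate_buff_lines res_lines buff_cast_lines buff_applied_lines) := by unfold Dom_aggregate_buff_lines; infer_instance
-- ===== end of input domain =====

-- B replaces A's single incremental pass of in-place nested counter updates by a group-by: project rows to (spell_id, source) pairs, then for each distinct spell_id filter out its sources and count each distinct source with list.count — an alternative decomposition (quadratic in distinct keys, not faster).

-- ===== PORT A =====
-- type-convention marshalling: a nested Dict rendered as the association lists of the convention
def pvDictToListA (d : PySem.Dict String (PySem.Dict String Int)) : List (String × List (String × Int)) :=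
  d.items.map (fun p => (p.1, p.2.items))

-- one line of A's inner loop: the in-place nested increment
def pvStepA (data : PySem.Dict String (PySem.Dict String Int)) (row : String × String × String × String) :
    PySem.Dict String (PySem.Dict String Int) :=
  let spell_id := row.1
  let source := row.2.2.1
  let data := if data.contains spell_id then data else data.insert spell_id PySem.Dict.empty
  let spell_dict := data.getD spell_id PySem.Dict.empty
  let spell_dict := if spell_dict.contains source then spell_dict else spell_dict.insert source 0
  data.insert spell_id (spell_dict.insert source (spell_dict.getD source 0 + 1))

def aggregate_buff_lines (res_lines : List (String × String × String × String)) (buff_cast_lines : List (String × String × String × String)) (buff_applied_lines : List (String × String × String × String)) : (List (String × List (String × Int))) × (List (String × List (String × Int))) × (List (String × List (String × Int))) :=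
  (pvDictToListA (res_lines.foldl pvStepA PySem.Dict.empty),
   pvDictToListA (buff_cast_lines.foldl pvStepA PySem.Dict.empty),
   pvDictToListA (buff_applied_lines.foldl pvStepA PySem.Dict.empty))

-- ===== PORT B =====
-- pairs = [(spell_id, source) for spell_id, _name, source, _target in lines]
def pvPairs (lines : List (String × String × String × String)) : List (String × String) :=
  lines.map (fun r => (r.1, r.2.2.1))

-- B's tally: for each distinct spell_id (dict.fromkeys order), filter its sources and
-- count each distinct source with list.count; the dict built over distinct fresh keys
-- is exactly this association list.
def pvTallyB (lines : List (String × String × String × String)) : List (String × List (String × Int)) :=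
  let pairs := pvPairs lines
  (PySem.List.dedup (pairs.map (fun p => p.1))).map (fun spell_id =>
    let sources := (pairs.filter (fun p => p.1 == spell_id)).map (fun p => p.2)
    (spell_id, (PySem.List.dedup sources).map (fun src => (src, (sources.count src : Int)))))

def aggregate_buff_lines_alt (res_lines : List (String × String × String × String)) (buff_cast_lines : List (String × String × String × String)) (buff_applied_lines : List (String × String × String × String)) : (List (String × List (String × Int))) × (List (String × List (String × Int))) × (List (String × List (String × Int))) :=
  (pvTallyB res_lines, pvTallyB buff_cast_lines, pvTallyB buff_applied_lines)

-- ===== PRECONDITION & SPEC =====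
def Spec_aggregate_buff_lines (res_lines : List (String × String × String × String)) (buff_cast_lines : List (String × String × String × String)) (buff_applied_lines : List (String × String × String × String)) (out : (List (String × List (String × Int))) × (List (String × List (String × Int))) × (List (String × List (String × Int)))) : Prop := out = aggregate_buff_lines_alt res_lines buff_cast_lines buff_applied_lines
instance (res_lines : List (String × String × String × String)) (buff_cast_lines : List (String × String × String × String)) (buff_applied_lines : List (String × String × String × String)) (out : (List (String × List (String × Int))) × (List (String × List (String × Int))) × (List (String × List (String × Int)))) : Decidable (Spec_aggregate_buff_lines res_lines buff_cast_lines buff_applied_lines out) := by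
  unfold Spec_aggregate_buff_lines
  letI h1 : DecidableEq (List (String × List (String × Int))) := inferInstance
  infer_instance

-- ===== CLAIM =====
def Claim_equal_aggregate_buff_lines : Prop := ∀ (res_lines : List (String × String × String × String)) (buff_cast_lines : List (String × String × String × String)) (buff_applied_lines : List (String × String × String × String)), Dom_aggregate_buff_lines res_lines buff_cast_lines buff_applied_lines → Spec_aggregate_buff_lines res_lines buff_cast_lines buff_applied_lines (aggregate_buff_lines res_lines buff_cast_lines buff_applied_lines)

-- ===== LEMMAS AND PROOFS =====

-- the net effect of A's step on the pair (spell_id, source)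
def pvBump (d : PySem.Dict String (PySem.Dict String Int)) (p : String × String) :
    PySem.Dict String (PySem.Dict String Int) :=
  d.insert p.1 ((d.getD p.1 PySem.Dict.empty).insert p.2 ((d.getD p.1 PySem.Dict.empty).getD p.2 0 + 1))

lemma stepA_eq_bump (d : PySem.Dict String (PySem.Dict String Int)) (row : String × String × String × String) :
    pvStepA d row = pvBump d (row.1, row.2.2.1) := by
  unfold pvStepA pvBump
  by_cases hc : d.contains row.1
  · simp only [hc, if_true]
    by_cases hs : (d.getD row.1 PySem.Dict.empty).contains row.2.2.1
    · simp [hs]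
    · simp [hs, PySem.Dict.getD_insert_self, PySem.Dict.insert_insert_self,
        PySem.Dict.getD_of_not_contains _ _ (by simpa using hs)]
  · simp [hc, PySem.Dict.getD_insert_self, PySem.Dict.insert_insert_self,
      PySem.Dict.contains_empty, PySem.Dict.getD_empty,
      PySem.Dict.getD_of_not_contains _ _ (by simpa using hc)]

lemma foldA_eq_foldPairs (lines : List (String × String × String × String))
    (d : PySem.Dict String (PySem.Dict String Int)) :
    lines.foldl pvStepA d = (pvPairs lines).foldl pvBump d := by
  unfold pvPairs
  rw [List.foldl_map]
  apply PySem.List.foldl_congr_mem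
  intro acc row _
  exact stepA_eq_bump acc row

-- the spell_id-slot of A's fold counts exactly the sources filtered out for that spell_id
lemma getD_foldPairs (pairs : List (String × String)) :
    ∀ (d : PySem.Dict String (PySem.Dict String Int)) (sid : String),
    (pairs.foldl pvBump d).getD sid PySem.Dict.empty
      = ((pairs.filter (fun p => p.1 == sid)).map (fun p => p.2)).foldl
          (fun e t => e.insert t (e.getD t 0 + 1)) (d.getD sid PySem.Dict.empty) := by
  induction pairs with
  | nil => intro d sid; rfl
  | cons q rest ih =>
    intro d sid
    simp only [List.foldl_cons, List.filter_cons]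
    by_cases h : q.1 = sid
    · have hb : (q.1 == sid) = true := by simpa using h
      simp only [hb, if_true, List.map_cons, List.foldl_cons]
      rw [ih]
      congr 1
      unfold pvBump
      rw [h, PySem.Dict.getD_insert_self]
    · have hb : (q.1 == sid) = false := by simpa using h
      simp only [hb, Bool.false_eq_true, if_false]
      rw [ih]
      congr 1
      unfold pvBump
      exact PySem.Dict.getD_insert_of_ne _ _ _ (fun hh => h hh.symm)

lemma keys_foldPairs (pairs : List (String × String)) :
    (pairs.foldl pvBump PySem.Dict.empty).keys = PySem.Set.ofList (pairs.map (fun p => p.1)) := by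
  have h := PySem.Dict.keys_foldl_insert_key pairs (fun p : String × String => p.1)
      (fun d p => ((d.getD p.1 PySem.Dict.empty).insert p.2
        ((d.getD p.1 PySem.Dict.empty).getD p.2 0 + 1)))
      (PySem.Dict.empty (κ := String) (ν := PySem.Dict String Int))
  simpa [pvBump, PySem.Dict.keys_empty, PySem.Set.update_nil_left] using h

lemma nodup_keys_foldPairs (pairs : List (String × String)) :
    (pairs.foldl pvBump PySem.Dict.empty).keys.Nodup := by
  rw [keys_foldPairs]
  exact PySem.Set.nodup_ofList _

-- A's fold, rendered as association lists, is B's group-by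
lemma dictToListA_fold (lines : List (String × String × String × String)) :
    pvDictToListA (lines.foldl pvStepA PySem.Dict.empty) = pvTallyB lines := by
  rw [foldA_eq_foldPairs]
  set pairs := pvPairs lines with hp
  unfold pvDictToListA pvTallyB
  rw [PySem.Dict.items_eq_map_keys _ (nodup_keys_foldPairs pairs) PySem.Dict.empty]
  rw [List.map_map, keys_foldPairs]
  simp only [PySem.List.dedup_eq_ofList, ← hp]
  apply List.map_congr_left
  intro sid _
  simp only [Function.comp]
  congr 1
  rw [getD_foldPairs pairs PySem.Dict.empty sid]
  rw [show (PySem.Dict.empty (κ := String) (ν := PySem.Dict String Int)).getD sid PySem.Dict.empty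
        = PySem.Dict.empty from PySem.Dict.getD_empty _ _]
  rw [PySem.Dict.foldl_insert_getD_add_one_eq_counter]
  rw [PySem.Dict.items_counter]

-- ===== VERDICT (by name: the statement is the Claim_ definition above) =====
theorem aggregate_buff_lines_spec : Claim_equal_aggregate_buff_lines := by
  intro r c ap _
  unfold Spec_aggregate_buff_lines aggregate_buff_lines aggregate_buff_lines_alt
  simp only [dictToListA_fold]
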